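-- pv_equiv track=rewrite | github.com/jdhozdiego/CMXsafeCloud | docs_api/allocator_app.py | qmark_to_postgres_sql
-- ===== SOURCE A (Python) =====
-- def qmark_to_postgres_sql(statement):
--     result = []
--     in_single = False
--     in_double = False
--     index = 0
--     while index < len(statement):
--         char = statement[index]
--         if char == "'" and not in_double:
--             result.append(char)
--             if in_single and index + 1 < len(statement) and statement[index + 1] == "'":
--                 result.append(statement[index + 1])
--                 index += 2
--                 continue
--             in_single = not in_single
--             index += 1
--             continue
--         if char == '"' and not in_single:
--             in_double = not in_double
--             result.append(char)
--             index += 1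
--             continue
--         if char == "?" and not in_single and not in_double:
--             result.append("%s")
--         else:
--             result.append(char)
--         index += 1
--     return "".join(result)
-- ===== SOURCE B (Python) =====
-- # Tokenizer: consume whole quoted strings at once instead of A's per-character flag scan.
-- def _take_single(s):
--     # s starts with "'"; return (token including quotes, rest). Unterminated swallows everything.
--     i = 1
--     while i < len(s):
--         if s[i] == "'":
--             if i + 1 < len(s) and s[i + 1] == "'":
--                 i += 2
--             else:
--                 return s[:i + 1], s[i + 1:]
--         else:
--             i += 1
--     return s, ""
--
--
-- def _take_double(s):
--     # s starts with '"'; return (token including quotes, rest). Unterminated swallows everything.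
--     j = s.find('"', 1)
--     if j == -1:
--         return s, ""
--     return s[:j + 1], s[j + 1:]
--
--
-- def qmark_to_postgres_sql(statement):
--     parts = []
--     s = statement
--     while s:
--         c = s[0]
--         if c == "'":
--             tok, s = _take_single(s)
--             parts.append(tok)
--         elif c == '"':
--             tok, s = _take_double(s)
--             parts.append(tok)
--         elif c == "?":
--             parts.append("%s")
--             s = s[1:]
--         else:
--             j = 1
--             while j < len(s) and s[j] not in "'\"?":
--                 j += 1
--             parts.append(s[:j])
--             s = s[j:]
--     return "".join(parts)
-- ===== Notes on version B (the rewrite author's own statement) =====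
-- stated objective: alternative
-- what changed: Replaces A's single per-character scan with in_single/in_double boolean flags by a tokenizer main loop that consumes each whole single-quoted string (with doubled-quote escapes), each whole double-quoted string, each question-mark placeholder, or each maximal run of plain characters in one helper call.
import Mathlib
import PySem

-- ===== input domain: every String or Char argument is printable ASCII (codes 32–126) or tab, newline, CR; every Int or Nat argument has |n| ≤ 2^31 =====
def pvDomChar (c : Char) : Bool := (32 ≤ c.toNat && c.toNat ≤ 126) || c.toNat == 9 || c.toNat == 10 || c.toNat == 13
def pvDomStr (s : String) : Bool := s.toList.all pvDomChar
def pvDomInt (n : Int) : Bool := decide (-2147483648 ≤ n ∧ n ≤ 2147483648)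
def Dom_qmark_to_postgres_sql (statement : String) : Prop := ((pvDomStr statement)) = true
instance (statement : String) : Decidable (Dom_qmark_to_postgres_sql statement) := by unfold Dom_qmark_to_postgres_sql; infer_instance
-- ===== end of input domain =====

-- B replaces A's per-character index/flag scan by a tokenizer that consumes each whole quoted
-- string (and each run of plain characters) in one helper call (objective: alternative).

-- ===== PORT A =====
-- A's while loop over `index` with flags in_single/in_double: each iteration consumes one
-- character, or two for the '' escape (the `index + 1 < len` lookahead is the two-deep pattern).
def qmarkGoA : List Char → Bool → Bool → List String
  | [], _, _ => []
  | [c], insg, indb =>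
    if c = '\'' && !indb then String.singleton c :: qmarkGoA [] (!insg) indb
    else if c = '"' && !insg then String.singleton c :: qmarkGoA [] insg (!indb)
    else if c = '?' && !insg && !indb then "%s" :: qmarkGoA [] insg indb
    else String.singleton c :: qmarkGoA [] insg indb
  | c :: c2 :: rest2, insg, indb =>
    if c = '\'' && !indb then
      if insg && c2 = '\'' then
        String.singleton c :: String.singleton c2 :: qmarkGoA rest2 insg indb
      else String.singleton c :: qmarkGoA (c2 :: rest2) (!insg) indb
    else if c = '"' && !insg then String.singleton c :: qmarkGoA (c2 :: rest2) insg (!indb)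
    else if c = '?' && !insg && !indb then "%s" :: qmarkGoA (c2 :: rest2) insg indb
    else String.singleton c :: qmarkGoA (c2 :: rest2) insg indb

def qmark_to_postgres_sql (statement : String) : String :=
  PySem.Str.join "" (qmarkGoA statement.toList false false)

-- ===== PORT B =====
-- _take_single after the opening quote: (token contents incl. closing quote, rest);
-- unterminated quote swallows the remainder.
def qmarkTakeSingle : List Char → List Char × List Char
  | [] => ([], [])
  | [c] =>
    if c = '\'' then ([c], [])
    else
      let p := qmarkTakeSingle []
      (c :: p.1, p.2)
  | c :: c2 :: rest2 =>
    if c = '\'' then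
      if c2 = '\'' then
        let p := qmarkTakeSingle rest2
        (c :: c2 :: p.1, p.2)
      else ([c], c2 :: rest2)
    else
      let p := qmarkTakeSingle (c2 :: rest2)
      (c :: p.1, p.2)

-- _take_double after the opening quote (the s.find('"', 1) scan)
def qmarkTakeDouble : List Char → List Char × List Char
  | [] => ([], [])
  | c :: rest =>
    if c = '"' then ([c], rest)
    else
      let p := qmarkTakeDouble rest
      (c :: p.1, p.2)

-- the inner while loop collecting a run of plain characters
def qmarkTakePlain : List Char → List Char × List Char
  | [] => ([], [])
  | c :: rest =>
    if c = '\'' ∨ c = '"' ∨ c = '?' then ([], c :: rest)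
    else
      let p := qmarkTakePlain rest
      (c :: p.1, p.2)

theorem qmarkTakeSingle_len : ∀ (l : List Char), (qmarkTakeSingle l).2.length ≤ l.length := by
  intro l
  induction l using qmarkTakeSingle.induct with
  | case1 => simp [qmarkTakeSingle]
  | case2 => simp [qmarkTakeSingle]
  | case3 c h ih => simp [qmarkTakeSingle, h]
  | case4 rest2 ih => simp only [qmarkTakeSingle]; simp at ih ⊢; omega
  | case5 c2 rest2 h => simp [qmarkTakeSingle, h]
  | case6 c c2 rest2 h ih => simp only [qmarkTakeSingle]; simp [h] at ih ⊢; omega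

theorem qmarkTakeDouble_len : ∀ (l : List Char), (qmarkTakeDouble l).2.length ≤ l.length := by
  intro l
  induction l with
  | nil => simp [qmarkTakeDouble]
  | cons c rest ih => by_cases h : c = '"' <;> simp [qmarkTakeDouble, h] <;> omega

theorem qmarkTakePlain_len : ∀ (l : List Char), (qmarkTakePlain l).2.length ≤ l.length := by
  intro l
  induction l with
  | nil => simp [qmarkTakePlain]
  | cons c rest ih =>
    by_cases h : c = '\'' ∨ c = '"' ∨ c = '?' <;> simp [qmarkTakePlain, h] <;> omega

def qmarkGoB : List Char → List String
  | [] => []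
  | c :: rest =>
    if c = '\'' then
      let p := qmarkTakeSingle rest
      String.ofList (c :: p.1) :: qmarkGoB p.2
    else if c = '"' then
      let p := qmarkTakeDouble rest
      String.ofList (c :: p.1) :: qmarkGoB p.2
    else if c = '?' then "%s" :: qmarkGoB rest
    else
      let p := qmarkTakePlain rest
      String.ofList (c :: p.1) :: qmarkGoB p.2
  termination_by l => l.length
  decreasing_by
  · have := qmarkTakeSingle_len rest; simp; omega
  · have := qmarkTakeDouble_len rest; simp; omega
  · simp
  · have := qmarkTakePlain_len rest; simp; omega

def qmark_to_postgres_sql_alt (statement : String) : String :=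
  PySem.Str.join "" (qmarkGoB statement.toList)

-- ===== PRECONDITION & SPEC =====
def Spec_qmark_to_postgres_sql (statement : String) (out : String) : Prop := out = qmark_to_postgres_sql_alt statement
instance (statement : String) (out : String) : Decidable (Spec_qmark_to_postgres_sql statement out) := by unfold Spec_qmark_to_postgres_sql; infer_instance

-- ===== CLAIM (what is proved, stated in full; the proofs are below) =====
def Claim_equal_qmark_to_postgres_sql : Prop := ∀ (statement : String), Dom_qmark_to_postgres_sql statement → Spec_qmark_to_postgres_sql statement (qmark_to_postgres_sql statement)

-- ===== LEMMAS AND PROOFS =====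

-- flattened character output of a list of result chunks
def qmarkFlat (xs : List String) : List Char := (xs.map String.toList).flatten

theorem qmarkFlat_nil : qmarkFlat [] = [] := rfl

theorem qmarkFlat_cons (s : String) (xs : List String) :
    qmarkFlat (s :: xs) = s.toList ++ qmarkFlat xs := by simp [qmarkFlat]

theorem qmark_join_flat : ∀ (xs : List String), (PySem.Str.join "" xs).toList = qmarkFlat xs := by
  have josep : ∀ (l : List (List Char)), PySem.Chars.join [] l = l.flatten := by
    intro l
    induction l with
    | nil => simp [PySem.Chars.join, List.intercalate]
    | cons x xs ih =>
      cases xs with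
      | nil => simp [PySem.Chars.join, List.intercalate]
      | cons y ys =>
        simp [PySem.Chars.join, List.intercalate] at ih ⊢
        simpa using ih
  intro xs
  simp [PySem.Str.toList_join, qmarkFlat, josep]

theorem qmarkGoA_single : ∀ (r : List Char),
    qmarkFlat (qmarkGoA r true false) =
      (qmarkTakeSingle r).1 ++ qmarkFlat (qmarkGoA (qmarkTakeSingle r).2 false false) := by
  intro r
  induction r using qmarkTakeSingle.induct with
  | case1 => simp [qmarkGoA, qmarkTakeSingle, qmarkFlat_nil]
  | case2 => simp [qmarkGoA, qmarkTakeSingle, qmarkFlat_cons, qmarkFlat_nil]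
  | case3 c h ih => simp [qmarkGoA, qmarkTakeSingle, qmarkFlat_cons, qmarkFlat_nil, h]
  | case4 rest2 ih =>
    simp only [qmarkGoA, qmarkTakeSingle]
    simp [qmarkFlat_cons, ih]
  | case5 c2 rest2 h => simp [qmarkGoA, qmarkTakeSingle, qmarkFlat_cons, h]
  | case6 c c2 rest2 h ih =>
    simp only [qmarkGoA, qmarkTakeSingle]
    simp [qmarkFlat_cons, h] at ih ⊢
    simpa using ih

theorem qmarkGoA_double : ∀ (r : List Char),
    qmarkFlat (qmarkGoA r false true) =
      (qmarkTakeDouble r).1 ++ qmarkFlat (qmarkGoA (qmarkTakeDouble r).2 false false) := by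
  intro r
  induction r with
  | nil => simp [qmarkGoA, qmarkTakeDouble, qmarkFlat_nil]
  | cons c rest ih =>
    by_cases h : c = '"'
    · subst h
      cases rest with
      | nil => simp [qmarkGoA, qmarkTakeDouble, qmarkFlat_cons, qmarkFlat_nil]
      | cons c2 rest2 => simp [qmarkGoA, qmarkTakeDouble, qmarkFlat_cons]
    · have hA : qmarkGoA (c :: rest) false true = String.singleton c :: qmarkGoA rest false true := by
        cases rest with
        | nil => simp [qmarkGoA, h]
        | cons c2 rest2 => simp [qmarkGoA, h]
      rw [hA, qmarkFlat_cons, ih]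
      simp [qmarkTakeDouble, h]

theorem qmarkGoA_plain : ∀ (r : List Char),
    qmarkFlat (qmarkGoA r false false) =
      (qmarkTakePlain r).1 ++ qmarkFlat (qmarkGoA (qmarkTakePlain r).2 false false) := by
  intro r
  induction r with
  | nil => simp [qmarkTakePlain]
  | cons c rest ih =>
    by_cases h : c = '\'' ∨ c = '"' ∨ c = '?'
    · simp [qmarkTakePlain, h]
    · have h1 : ¬ c = '\'' := fun hc => h (Or.inl hc)
      have h2 : ¬ c = '"' := fun hc => h (Or.inr (Or.inl hc))
      have h3 : ¬ c = '?' := fun hc => h (Or.inr (Or.inr hc))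
      have hA : qmarkGoA (c :: rest) false false = String.singleton c :: qmarkGoA rest false false := by
        cases rest with
        | nil => simp [qmarkGoA, h1, h2, h3]
        | cons c2 rest2 => simp [qmarkGoA, h1, h2, h3]
      rw [hA, qmarkFlat_cons, ih]
      simp [qmarkTakePlain, h]

theorem qmark_main : ∀ (n : Nat) (l : List Char), l.length ≤ n →
    qmarkFlat (qmarkGoA l false false) = qmarkFlat (qmarkGoB l) := by
  intro n
  induction n with
  | zero =>
    intro l hl
    have : l = [] := by cases l <;> simp_all
    subst this
    simp [qmarkGoA, qmarkGoB]
  | succ n ih =>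
    intro l hl
    cases l with
    | nil => simp [qmarkGoA, qmarkGoB]
    | cons c rest =>
      by_cases h1 : c = '\''
      · subst h1
        have hlen := qmarkTakeSingle_len rest
        have hA : qmarkGoA ('\'' :: rest) false false =
            String.singleton '\'' :: qmarkGoA rest true false := by
          cases rest with
          | nil => simp [qmarkGoA]
          | cons c2 rest2 => simp [qmarkGoA]
        rw [hA, qmarkFlat_cons, qmarkGoA_single rest,
            ih (qmarkTakeSingle rest).2 (by simp at hl; omega)]
        simp [qmarkGoB, qmarkFlat_cons]
      · by_cases h2 : c = '"'
        · subst h2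
          have hlen := qmarkTakeDouble_len rest
          have hA : qmarkGoA ('"' :: rest) false false =
              String.singleton '"' :: qmarkGoA rest false true := by
            cases rest with
            | nil => simp [qmarkGoA]
            | cons c2 rest2 => simp [qmarkGoA]
          rw [hA, qmarkFlat_cons, qmarkGoA_double rest,
              ih (qmarkTakeDouble rest).2 (by simp at hl; omega)]
          simp [qmarkGoB, qmarkFlat_cons]
        · by_cases h3 : c = '?'
          · subst h3
            have hA : qmarkGoA ('?' :: rest) false false =
                "%s" :: qmarkGoA rest false false := by
              cases rest with
              | nil => simp [qmarkGoA]
              | cons c2 rest2 => simp [qmarkGoA]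
            rw [hA, qmarkFlat_cons, ih rest (by simp at hl; omega)]
            simp [qmarkGoB, qmarkFlat_cons]
          · have hlen := qmarkTakePlain_len rest
            have hA : qmarkGoA (c :: rest) false false =
                String.singleton c :: qmarkGoA rest false false := by
              cases rest with
              | nil => simp [qmarkGoA, h1, h2, h3]
              | cons c2 rest2 => simp [qmarkGoA, h1, h2, h3]
            rw [hA, qmarkFlat_cons, qmarkGoA_plain rest,
                ih (qmarkTakePlain rest).2 (by simp at hl; omega)]
            simp [qmarkGoB, qmarkFlat_cons, h1, h2, h3]

-- ===== VERDICT (by name: the statement is the Claim_ definition above) =====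
theorem qmark_to_postgres_sql_spec : Claim_equal_qmark_to_postgres_sql := by
  intro statement _
  unfold Spec_qmark_to_postgres_sql qmark_to_postgres_sql qmark_to_postgres_sql_alt
  apply String.ext
  have h := qmark_main statement.toList.length statement.toList le_rfl
  have h1 := qmark_join_flat (qmarkGoA statement.toList false false)
  have h2 := qmark_join_flat (qmarkGoB statement.toList)
  show (PySem.Str.join "" (qmarkGoA statement.toList false false)).toList =
       (PySem.Str.join "" (qmarkGoB statement.toList)).toList
  rw [h1, h2, h]
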